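-- pv_equiv track=rewrite | github.com/Yonasketema/clip | tiktok/youtube_upload/upload.py | get_max_title
-- ===== SOURCE A (Python) =====
-- def get_max_title(title):
--     valid_title = ""
--     title_words = title.split()
--     for word in title_words:
--         if len(valid_title) + len(word) + 1 <= 100:
--             valid_title += (word + " ")
--         else:
--             break
--     return valid_title.strip()
-- ===== SOURCE B (Python) =====
-- def get_max_title(title):
--     words = title.split()
--     cums = []
--     total = 0
--     for w in words:
--         total += len(w) + 1
--         cums.append(total)
--     k = 0
--     while k < len(cums) and cums[k] <= 100:
--         k += 1
--     return " ".join(words[:k])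
-- ===== Notes on version B (the rewrite author's own statement) =====
-- stated objective: alternative
-- what changed: Replaces A's grow-a-string-with-trailing-spaces-then-strip loop by a prefix-sum pass over word lengths, a cutoff scan over the cumulative sums, and a single space-join of the selected word prefix.
import Mathlib
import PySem

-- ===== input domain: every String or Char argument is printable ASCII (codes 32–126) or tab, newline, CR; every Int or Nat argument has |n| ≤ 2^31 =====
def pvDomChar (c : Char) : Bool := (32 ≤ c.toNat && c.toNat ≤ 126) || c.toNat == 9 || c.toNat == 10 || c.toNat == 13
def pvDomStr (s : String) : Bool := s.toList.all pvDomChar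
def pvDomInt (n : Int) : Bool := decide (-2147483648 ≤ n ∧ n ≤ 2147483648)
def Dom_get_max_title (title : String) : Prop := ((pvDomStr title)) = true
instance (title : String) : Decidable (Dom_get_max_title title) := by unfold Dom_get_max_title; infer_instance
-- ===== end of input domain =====

-- B replaces A's grow-a-string-then-strip loop by prefix sums of word lengths, a cutoff scan, and one join (alternative decomposition, same cost).

-- ===== PORT A =====
-- the 'for word in title_words: … break' loop of A, state = valid_title
def pvALoop : List (List Char) → List Char → List Char
  | [], valid => valid
  | w :: ws, valid =>
    if valid.length + w.length + 1 ≤ 100 then pvALoop ws (valid ++ w ++ [' '])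
    else valid

def get_max_title (title : String) : String :=
  String.ofList (PySem.Chars.strip (pvALoop (PySem.Chars.split₀ title.toList) []))

-- ===== PORT B =====
-- Source B's first loop: build the list of cumulative sums 'cums' with accumulator 'total'
def pvBCums : List (List Char) → Nat → List Nat
  | [], _ => []
  | w :: ws, total => (total + w.length + 1) :: pvBCums ws (total + w.length + 1)

-- Source B's while loop: count leading cums entries ≤ 100 (state k, advanced while the entry fits)
def pvBCount : List Nat → Nat
  | [] => 0
  | c :: cs => if c ≤ 100 then pvBCount cs + 1 else 0

def get_max_title_alt (title : String) : String :=
  let words := PySem.Chars.split₀ title.toList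
  let cums := pvBCums words 0
  let k := pvBCount cums
  String.ofList (PySem.Chars.join [' '] (words.take k))

-- ===== PRECONDITION & SPEC =====
def Spec_get_max_title (title : String) (out : String) : Prop := out = get_max_title_alt title
instance (title : String) (out : String) : Decidable (Spec_get_max_title title out) := by unfold Spec_get_max_title; infer_instance

-- ===== CLAIM (what is proved, stated in full; the proofs are below) =====
def Claim_equal_get_max_title : Prop := ∀ (title : String), Dom_get_max_title title → Spec_get_max_title title (get_max_title title)

-- ===== LEMMAS AND PROOFS =====

-- rendering of a word list the way A's loop concatenates it: each word followed by one space
def pvJ (l : List (List Char)) : List Char := (l.map (· ++ [' '])).flatten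

-- a word produced by split₀: nonempty and whitespace-free
def pvWord (w : List Char) : Prop := w ≠ [] ∧ ∀ c ∈ w, PySem.Chars.isspace c = false

theorem pv_go_sound (rest : List Char) :
    ∀ (cur : List Char) (acc : List (List Char)),
      (∀ c ∈ cur, PySem.Chars.isspace c = false) →
      (∀ w ∈ acc, pvWord w) →
      ∀ w ∈ PySem.Chars.split₀.go rest cur acc, pvWord w := by
  induction rest with
  | nil =>
    intro cur acc hcur hacc w hw
    simp only [PySem.Chars.split₀.go] at hw
    by_cases hemp : cur.isEmpty = true
    · rw [if_pos hemp] at hw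
      exact hacc w (by simpa using hw)
    · rw [if_neg hemp] at hw
      rw [List.mem_reverse, List.mem_cons] at hw
      rcases hw with h | h
      · subst h
        exact ⟨by simpa [List.isEmpty_iff] using hemp,
          fun d hd => hcur d (by simpa using hd)⟩
      · exact hacc w h
  | cons a rest ih =>
    intro cur acc hcur hacc w hw
    simp only [PySem.Chars.split₀.go] at hw
    by_cases hsp : PySem.Chars.isspace a = true
    · rw [if_pos hsp] at hw
      by_cases hemp : cur.isEmpty = true
      · rw [if_pos hemp] at hw
        exact ih [] acc (by simp) hacc w hw
      · rw [if_neg hemp] at hw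
        refine ih [] _ (by simp) ?_ w hw
        intro v hv
        rw [List.mem_cons] at hv
        rcases hv with h | h
        · subst h
          exact ⟨by simpa [List.isEmpty_iff] using hemp,
            fun d hd => hcur d (by simpa using hd)⟩
        · exact hacc v h
    · rw [if_neg hsp] at hw
      refine ih (a :: cur) acc ?_ hacc w hw
      intro d hd
      rw [List.mem_cons] at hd
      rcases hd with h | h
      · subst h; simpa using hsp
      · exact hcur d h

theorem pv_split₀_sound (s : List Char) : ∀ w ∈ PySem.Chars.split₀ s, pvWord w :=
  pv_go_sound s [] [] (by simp) (by simp)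

-- A's loop equals: the rendered take-prefix selected by B's cutoff condition
theorem pv_aLoop_eq (ws : List (List Char)) :
    ∀ acc, pvALoop ws acc = acc ++ pvJ (ws.take (pvBCount (pvBCums ws acc.length))) := by
  induction ws with
  | nil => intro acc; simp [pvALoop, pvJ]
  | cons w ws ih =>
    intro acc
    simp only [pvALoop, pvBCums, pvBCount]
    by_cases h : acc.length + w.length + 1 ≤ 100
    · rw [if_pos h, if_pos h, ih]
      simp [pvJ, List.append_assoc, Nat.add_assoc]
    · rw [if_neg h, if_neg h]
      simp [pvJ]

-- join of a nonempty good word list: last char is not whitespace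
theorem pv_join_last (l : List (List Char)) (hl : l ≠ [])
    (hw : ∀ w ∈ l, pvWord w) :
    ∃ c cs, (PySem.Chars.join [' '] l).reverse = c :: cs ∧ PySem.Chars.isspace c = false := by
  induction l with
  | nil => exact absurd rfl hl
  | cons w t ih =>
    cases t with
    | nil =>
      rcases hw w (by simp) with ⟨hne, hns⟩
      rcases List.exists_cons_of_ne_nil (mt List.reverse_eq_nil_iff.mp hne) with ⟨c, cs, hc⟩
      refine ⟨c, cs, by rw [PySem.Chars.join_singleton]; exact hc, hns c ?_⟩
      rw [← List.mem_reverse, hc]; simp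
    | cons v t' =>
      rcases ih (by simp) (fun u hu => hw u (by simp [hu])) with ⟨c, cs, hc, hns⟩
      refine ⟨c, cs ++ ' ' :: w.reverse, ?_, hns⟩
      rw [PySem.Chars.join_cons_cons]
      simp [List.reverse_append, hc]

-- strip of A's rendering equals B's join, for good word lists
theorem pv_strip_J (l : List (List Char)) (hw : ∀ w ∈ l, pvWord w) :
    PySem.Chars.strip (pvJ l) = PySem.Chars.join [' '] l := by
  cases l with
  | nil => simp [pvJ, PySem.Chars.strip, PySem.Chars.lstrip, PySem.Chars.rstrip, PySem.Chars.join_nil]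
  | cons w t =>
    -- pvJ (w :: t) = join [' '] (w :: t) ++ [' ']
    have hJ : ∀ (w : List Char) (t : List (List Char)),
        pvJ (w :: t) = PySem.Chars.join [' '] (w :: t) ++ [' '] := by
      intro w t
      induction t generalizing w with
      | nil => simp [pvJ, PySem.Chars.join_singleton]
      | cons v t' ih =>
        rw [PySem.Chars.join_cons_cons]
        have : pvJ (w :: v :: t') = (w ++ [' ']) ++ pvJ (v :: t') := by simp [pvJ]
        rw [this, ih v]
        simp
    rw [hJ]
    rcases hw w (by simp) with ⟨hne, hns⟩
    rcases List.exists_cons_of_ne_nil hne with ⟨c, cs, hc⟩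
    rcases pv_join_last (w :: t) (by simp) hw with ⟨d, ds, hd, hdns⟩
    -- rstrip drops exactly the trailing space
    have hr : PySem.Chars.rstrip (PySem.Chars.join [' '] (w :: t) ++ [' ']) =
        PySem.Chars.join [' '] (w :: t) := by
      unfold PySem.Chars.rstrip
      rw [List.reverse_append]
      simp only [List.reverse_cons, List.reverse_nil, List.nil_append, List.singleton_append]
      rw [List.dropWhile_cons_of_pos (by simp [PySem.Chars.isspace])]
      rw [hd, List.dropWhile_cons_of_neg (by simp [hdns]), ← hd]
      simp
    -- lstrip is the identity here: the first char is from w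
    have hjoin_head : ∃ rest, PySem.Chars.join [' '] (w :: t) = c :: rest := by
      cases t with
      | nil => exact ⟨cs, by simpa [PySem.Chars.join_singleton] using hc⟩
      | cons v t' =>
        rw [PySem.Chars.join_cons_cons, hc]
        exact ⟨cs ++ [' '] ++ PySem.Chars.join [' '] (v :: t'), by simp⟩
    rcases hjoin_head with ⟨rest, hrest⟩
    unfold PySem.Chars.strip PySem.Chars.lstrip
    rw [hrest]
    rw [List.cons_append, List.dropWhile_cons_of_neg
      (by simp [hns c (by rw [hc]; simp)])]
    rw [← List.cons_append, ← hrest, hr]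

-- ===== VERDICT (by name: the statement is the Claim_ definition above) =====
theorem get_max_title_spec : Claim_equal_get_max_title := by
  intro title _
  unfold Spec_get_max_title get_max_title get_max_title_alt
  have h := pv_aLoop_eq (PySem.Chars.split₀ title.toList) []
  simp only [List.length_nil, List.nil_append] at h
  rw [h, pv_strip_J]
  intro w hw
  exact pv_split₀_sound title.toList w (List.mem_of_mem_take hw)
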